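-- pv_equiv track=rewrite | github.com/maik0006/Python | Ejercicio33.py | aplicar_reglas
-- ===== SOURCE A (Python) =====
-- def contar_vecinos_vivos(tablero, fila, columna):
--     """Cuenta cuántos vecinos vivos tiene una célula."""
--     filas = len(tablero)
--     columnas = len(tablero[0])
--     vecinos_vivos = 0
--     direcciones = [
--         (-1, -1), (-1, 0), (-1, 1),
--         (0, -1),           (0, 1),
--         (1, -1),  (1, 0),  (1, 1)
--     ]
--     for df, dc in direcciones:
--         nueva_fila = fila + df
--         nueva_columna = columna + dc
--         if 0 <= nueva_fila < filas and 0 <= nueva_columna < columnas: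
--             vecinos_vivos += tablero[nueva_fila][nueva_columna]
--     return vecinos_vivos
--
-- def aplicar_reglas(tablero):
--     """Aplica las reglas del Juego de la Vida para generar la siguiente generación."""
--     filas = len(tablero)
--     columnas = len(tablero[0])
--     nuevo_tablero = [[0 for _ in range(columnas)] for _ in range(filas)]
--     cambios = []
--
--     for i in range(filas):
--         for j in range(columnas):
--             vecinos = contar_vecinos_vivos(tablero, i, j)
--             celula_actual = tablero[i][j]
--
--             if celula_actual == 1:  # Célula viva
--                 if vecinos < 2:
--                     nuevo_tablero[i][j] = 0
--                     cambios.append((i, j, "murió por soledad"))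
--                 elif vecinos > 3:
--                     nuevo_tablero[i][j] = 0
--                     cambios.append((i, j, "murió por sobrepoblación"))
--                 else:
--                     nuevo_tablero[i][j] = 1  # Sobrevive
--             else:  # Célula muerta
--                 if vecinos == 3:
--                     nuevo_tablero[i][j] = 1
--                     cambios.append((i, j, "nació"))
--
--     return nuevo_tablero, cambios
-- ===== SOURCE B (Python) =====
-- def aplicar_reglas(tablero):
--     """Aplica las reglas del Juego de la Vida para generar la siguiente generación."""
--     filas = len(tablero)
--     columnas = len(tablero[0])
--     # prefix-sum table: S[i][j] = sum of tablero[a][b] for a < i, b < j (b < columnas)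
--     S = [[0] * (columnas + 1)]
--     for fila in tablero:
--         previa = S[-1]
--         nueva = [0]
--         acumulado = 0
--         for j in range(columnas):
--             acumulado += fila[j]
--             nueva.append(previa[j + 1] + acumulado)
--         S.append(nueva)
--     nuevo_tablero = []
--     cambios = []
--     for i in range(filas):
--         r0 = max(i - 1, 0)
--         r1 = min(i + 2, filas)
--         Sr0 = S[r0]
--         Sr1 = S[r1]
--         fila_nueva = []
--         for j in range(columnas):
--             c0 = max(j - 1, 0)
--             c1 = min(j + 2, columnas)
--             celula = tablero[i][j]
--             vecinos = Sr1[c1] - Sr1[c0] - Sr0[c1] + Sr0[c0] - celula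
--             if celula == 1:
--                 if vecinos < 2:
--                     fila_nueva.append(0)
--                     cambios.append((i, j, "murió por soledad"))
--                 elif vecinos > 3:
--                     fila_nueva.append(0)
--                     cambios.append((i, j, "murió por sobrepoblación"))
--                 else:
--                     fila_nueva.append(1)
--             else:
--                 if vecinos == 3:
--                     fila_nueva.append(1)
--                     cambios.append((i, j, "nació"))
--                 else:
--                     fila_nueva.append(0)
--         nuevo_tablero.append(fila_nueva)
--     return nuevo_tablero, cambios
-- ===== Notes on version B (the rewrite author's own statement) =====
-- stated objective: faster
-- what changed: B builds a 2-D prefix-sum table of the board once and derives each cell's neighbour count as a clamped 3x3 block sum (4 table lookups) minus the centre cell, instead of A's per-cell call that scans 8 direction offsets with bounds tests; the new board is built by appending rows rather than preallocating a zero matrix and assigning into it.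
import Mathlib
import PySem

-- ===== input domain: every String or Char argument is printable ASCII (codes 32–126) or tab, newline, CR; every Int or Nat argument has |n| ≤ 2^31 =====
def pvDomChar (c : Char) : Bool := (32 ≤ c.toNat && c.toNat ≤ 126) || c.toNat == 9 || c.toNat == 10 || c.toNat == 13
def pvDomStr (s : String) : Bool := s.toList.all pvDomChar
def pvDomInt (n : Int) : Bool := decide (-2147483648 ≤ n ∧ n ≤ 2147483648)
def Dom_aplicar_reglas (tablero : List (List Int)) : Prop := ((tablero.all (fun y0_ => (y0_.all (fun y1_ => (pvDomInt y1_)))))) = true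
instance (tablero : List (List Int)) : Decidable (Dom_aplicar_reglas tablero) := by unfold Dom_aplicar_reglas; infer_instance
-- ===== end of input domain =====

-- B replaces A's per-cell 8-direction bounds-checked neighbour scan by a prefix-sum table
-- (one clamped 3x3 block sum, 4 lookups, minus the centre) and builds the new board by
-- appending rows instead of assigning into a preallocated zero matrix.

-- ===== PORT A =====
-- 'nuevo_tablero[i][j] = v' — exact for the non-negative in-range loop indices used below
def pyStore2 (m : List (List Int)) (i j : Int) (v : Int) : List (List Int) :=
  PySem.List.pySetD m i (PySem.List.pySetD (PySem.List.pyGetD m i []) j v)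

def contar_vecinos_vivos (tablero : List (List Int)) (fila columna : Int) : Int :=
  let filas : Int := tablero.length
  let columnas : Int := (PySem.List.pyGetD tablero 0 []).length
  let direcciones : List (Int × Int) :=
    [(-1, -1), (-1, 0), (-1, 1), (0, -1), (0, 1), (1, -1), (1, 0), (1, 1)]
  direcciones.foldl (fun vecinos_vivos d =>
    let nueva_fila := fila + d.1
    let nueva_columna := columna + d.2
    if 0 ≤ nueva_fila ∧ nueva_fila < filas ∧ 0 ≤ nueva_columna ∧ nueva_columna < columnas then
      vecinos_vivos + PySem.List.pyGetD (PySem.List.pyGetD tablero nueva_fila []) nueva_columna 0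
    else vecinos_vivos) 0

def aplicar_reglas (tablero : List (List Int)) : List (List Int) × (List (Int × Int × String)) :=
  let filas : Int := tablero.length
  let columnas : Int := (PySem.List.pyGetD tablero 0 []).length
  let nuevo_tablero : List (List Int) :=
    (PySem.List.pyRange 0 filas 1).map (fun _ => (PySem.List.pyRange 0 columnas 1).map (fun _ => (0 : Int)))
  (PySem.List.pyRange 0 filas 1).foldl (fun st i =>
    (PySem.List.pyRange 0 columnas 1).foldl (fun st j =>
      let vecinos := contar_vecinos_vivos tablero i j
      let celula_actual := PySem.List.pyGetD (PySem.List.pyGetD tablero i []) j 0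
      if celula_actual = 1 then
        if vecinos < 2 then (pyStore2 st.1 i j 0, st.2 ++ [(i, j, "murió por soledad")])
        else if 3 < vecinos then (pyStore2 st.1 i j 0, st.2 ++ [(i, j, "murió por sobrepoblación")])
        else (pyStore2 st.1 i j 1, st.2)
      else
        if vecinos = 3 then (pyStore2 st.1 i j 1, st.2 ++ [(i, j, "nació")])
        else st) st) (nuevo_tablero, [])

-- ===== PORT B =====
def aplicar_reglas_alt (tablero : List (List Int)) : List (List Int) × (List (Int × Int × String)) :=
  let filas : Int := tablero.length
  let columnas : Int := (PySem.List.pyGetD tablero 0 []).length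
  let S : List (List Int) := tablero.foldl (fun S fila =>
      let previa := PySem.List.pyGetD S (-1) []
      let r := (PySem.List.pyRange 0 columnas 1).foldl (fun (p : List Int × Int) j =>
          let acumulado := p.2 + PySem.List.pyGetD fila j 0
          (p.1 ++ [PySem.List.pyGetD previa (j + 1) 0 + acumulado], acumulado)) ([(0 : Int)], 0)
      S ++ [r.1]) [PySem.List.pyRepeat [(0 : Int)] (columnas + 1)]
  (PySem.List.pyRange 0 filas 1).foldl (fun st i =>
    let r0 := max (i - 1) 0
    let r1 := min (i + 2) filas
    let Sr0 := PySem.List.pyGetD S r0 []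
    let Sr1 := PySem.List.pyGetD S r1 []
    let inner := (PySem.List.pyRange 0 columnas 1).foldl
      (fun (st2 : List Int × List (Int × Int × String)) j =>
        let c0 := max (j - 1) 0
        let c1 := min (j + 2) columnas
        let celula := PySem.List.pyGetD (PySem.List.pyGetD tablero i []) j 0
        let vecinos := PySem.List.pyGetD Sr1 c1 0 - PySem.List.pyGetD Sr1 c0 0
          - PySem.List.pyGetD Sr0 c1 0 + PySem.List.pyGetD Sr0 c0 0 - celula
        if celula = 1 then
          if vecinos < 2 then (st2.1 ++ [0], st2.2 ++ [(i, j, "murió por soledad")])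
          else if 3 < vecinos then (st2.1 ++ [0], st2.2 ++ [(i, j, "murió por sobrepoblación")])
          else (st2.1 ++ [1], st2.2)
        else
          if vecinos = 3 then (st2.1 ++ [1], st2.2 ++ [(i, j, "nació")])
          else (st2.1 ++ [0], st2.2)) ([], st.2)
    (st.1 ++ [inner.1], inner.2)) ([], [])

-- ===== PRECONDITION & SPEC =====
-- Pre_ excludes exactly the inputs on which the Python A raises: the empty board
-- (tablero[0] is an IndexError) and boards with a row shorter than the first row
-- (that row is indexed at every column below len(tablero[0]), an IndexError).
def Pre_aplicar_reglas (tablero : List (List Int)) : Prop :=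
  tablero ≠ [] ∧ ∀ r ∈ tablero, (tablero.getD 0 []).length ≤ r.length
instance (tablero : List (List Int)) : Decidable (Pre_aplicar_reglas tablero) := by
  unfold Pre_aplicar_reglas; infer_instance

def pvWitness_aplicar_reglas : List (List Int) := [[0, 1, 0], [0, 1, 0], [0, 1, 0]]

def Spec_aplicar_reglas (tablero : List (List Int)) (out : List (List Int) × (List (Int × Int × String))) : Prop := out = aplicar_reglas_alt tablero
instance (tablero : List (List Int)) (out : List (List Int) × (List (Int × Int × String))) : Decidable (Spec_aplicar_reglas tablero out) := by unfold Spec_aplicar_reglas; infer_instance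

-- ===== CLAIM (what is proved, stated in full; the proofs are below) =====
def Claim_equal_aplicar_reglas : Prop := ∀ (tablero : List (List Int)), Dom_aplicar_reglas tablero → Pre_aplicar_reglas tablero → Spec_aplicar_reglas tablero (aplicar_reglas tablero)

-- ===== LEMMAS AND PROOFS =====

def pvG (t : List (List Int)) (a b : Nat) : Int := (t.getD a []).getD b 0

def pvQ (t : List (List Int)) (a c : Nat) : Int := ((List.range c).map (pvG t a)).sum

def pvP (t : List (List Int)) (r c : Nat) : Int := ((List.range r).map (fun a => pvQ t a c)).sum

def pvRow (t : List (List Int)) (a j : Nat) : Int :=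
  (if 1 ≤ j then pvG t a (j - 1) else 0) + pvG t a j +
    (if j + 1 < (t.getD 0 []).length then pvG t a (j + 1) else 0)

def pvVal (t : List (List Int)) (i j : Nat) : Int :=
  if pvG t i j = 1 then
    (if contar_vecinos_vivos t i j < 2 ∨ 3 < contar_vecinos_vivos t i j then 0 else 1)
  else (if contar_vecinos_vivos t i j = 3 then 1 else 0)

def pvChg (t : List (List Int)) (i j : Nat) : Option (Int × Int × String) :=
  if pvG t i j = 1 then
    (if contar_vecinos_vivos t i j < 2 then some ((i : Int), (j : Int), "murió por soledad")
     else if 3 < contar_vecinos_vivos t i j then some ((i : Int), (j : Int), "murió por sobrepoblación")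
     else none)
  else (if contar_vecinos_vivos t i j = 3 then some ((i : Int), (j : Int), "nació") else none)

lemma sum_map_sub (l : List Nat) (f g : Nat → Int) :
    (l.map (fun x => f x - g x)).sum = (l.map f).sum - (l.map g).sum := by
  induction l with
  | nil => simp
  | cons x xs ih => simp [ih]; ring

lemma sum_range_add (f : Nat → Int) (c0 m : Nat) :
    ((List.range (c0 + m)).map f).sum
      = ((List.range c0).map f).sum + ((List.range m).map (fun e => f (c0 + e))).sum := by
  rw [List.range_add, List.map_append, List.sum_append, List.map_map]
  simp [Function.comp_def]

lemma Q_sub (t : List (List Int)) (a c0 c1 : Nat) (h : c0 ≤ c1) :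
    pvQ t a c1 - pvQ t a c0 = ((List.range (c1 - c0)).map (fun e => pvG t a (c0 + e))).sum := by
  have hc : c0 + (c1 - c0) = c1 := by omega
  have key := sum_range_add (pvG t a) c0 (c1 - c0)
  rw [hc] at key
  simp only [pvQ]
  linarith [key]

lemma P_sub (t : List (List Int)) (r0 r1 c : Nat) (h : r0 ≤ r1) :
    pvP t r1 c - pvP t r0 c = ((List.range (r1 - r0)).map (fun d => pvQ t (r0 + d) c)).sum := by
  have hr : r0 + (r1 - r0) = r1 := by omega
  have key := sum_range_add (fun a => pvQ t a c) r0 (r1 - r0)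
  rw [hr] at key
  simp only [pvP]
  linarith [key]

lemma window1 (f : Nat → Int) (i n : Nat) (h : i < n) :
    ((List.range (min (i + 2) n - (i - 1))).map (fun d => f (i - 1 + d))).sum
      = (if 1 ≤ i then f (i - 1) else 0) + f i + (if i + 1 < n then f (i + 1) else 0) := by
  by_cases h1 : 1 ≤ i <;> by_cases h2 : i + 1 < n
  · have e : min (i + 2) n - (i - 1) = 3 := by omega
    have e1 : i - 1 + 1 = i := by omega
    have e2 : i - 1 + 2 = i + 1 := by omega
    rw [e]; simp [List.range_succ, e1, e2, h1, h2]; ring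
  · have e : min (i + 2) n - (i - 1) = 2 := by omega
    have e1 : i - 1 + 1 = i := by omega
    rw [e]; simp [List.range_succ, e1, h1, h2]
  · have hi0 : i = 0 := by omega
    subst hi0
    have e : min 2 n - 0 = 2 := by omega
    rw [e]; simp [List.range_succ, h2]
  · have hi0 : i = 0 := by omega
    subst hi0
    have e : min 2 n - 0 = 1 := by omega
    rw [e]; simp [List.range_succ, h2]

lemma blockW (t : List (List Int)) (i j : Nat) (hi : i < t.length)
    (hj : j < (t.getD 0 []).length) :
    pvP t (min (i + 2) t.length) (min (j + 2) (t.getD 0 []).length)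
      - pvP t (min (i + 2) t.length) (j - 1)
      - pvP t (i - 1) (min (j + 2) (t.getD 0 []).length)
      + pvP t (i - 1) (j - 1)
    = (if 1 ≤ i then pvRow t (i - 1) j else 0) + pvRow t i j
        + (if i + 1 < t.length then pvRow t (i + 1) j else 0) := by
  have h1 := P_sub t (i - 1) (min (i + 2) t.length) (min (j + 2) (t.getD 0 []).length) (by omega)
  have h2 := P_sub t (i - 1) (min (i + 2) t.length) (j - 1) (by omega)
  have e3 : (List.range (min (i + 2) t.length - (i - 1))).map
        (fun d => pvQ t (i - 1 + d) (min (j + 2) (t.getD 0 []).length) - pvQ t (i - 1 + d) (j - 1))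
      = (List.range (min (i + 2) t.length - (i - 1))).map (fun d => pvRow t (i - 1 + d) j) := by
    refine List.map_congr_left fun d _ => ?_
    rw [Q_sub t (i - 1 + d) (j - 1) (min (j + 2) (t.getD 0 []).length) (by omega)]
    have e : min (j + 2) (t.getD 0 []).length - (j - 1)
        = min (j + 2) (t.getD 0 []).length - (j - 1) := rfl
    rw [window1 (pvG t (i - 1 + d)) j (t.getD 0 []).length hj]
    simp only [pvRow]
  have h3 := sum_map_sub (List.range (min (i + 2) t.length - (i - 1)))
    (fun d => pvQ t (i - 1 + d) (min (j + 2) (t.getD 0 []).length))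
    (fun d => pvQ t (i - 1 + d) (j - 1))
  rw [e3] at h3
  have h5 := window1 (fun a => pvRow t a j) i t.length hi
  simp only at h5
  linarith

lemma foldl_guard_add {α : Type} (l : List α) (c : α → Prop) [DecidablePred c]
    (g : α → Int) (a : Int) :
    l.foldl (fun acc x => if c x then acc + g x else acc) a
      = a + (l.map (fun x => if c x then g x else 0)).sum := by
  induction l generalizing a with
  | nil => simp
  | cons x xs ih =>
    simp only [List.foldl_cons, List.map_cons, List.sum_cons]
    split_ifs with h
    · rw [ih]; ring
    · rw [ih]; ring

lemma dir_term (t : List (List Int)) (a b : Int) :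
    (if 0 ≤ a ∧ a < (t.length : Int) ∧ 0 ≤ b ∧ b < ((PySem.List.pyGetD t 0 []).length : Int)
      then PySem.List.pyGetD (PySem.List.pyGetD t a []) b 0 else 0)
    = if 0 ≤ a ∧ a < (t.length : Int) ∧ 0 ≤ b ∧ b < (((t.getD 0 []).length : Nat) : Int)
      then pvG t a.toNat b.toNat else 0 := by
  rw [PySem.List.pyGetD_zero]
  split_ifs with h
  · obtain ⟨ha, _, hb, _⟩ := h
    rw [PySem.List.pyGetD_of_nonneg _ _ ha, PySem.List.pyGetD_of_nonneg _ _ hb]; rfl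
  · rfl

set_option maxHeartbeats 1000000 in
lemma vec_eq (t : List (List Int)) (i j : Nat) (hi : i < t.length)
    (hj : j < (t.getD 0 []).length) :
    contar_vecinos_vivos t i j
      = (if 1 ≤ i then pvRow t (i - 1) j else 0) + pvRow t i j
          + (if i + 1 < t.length then pvRow t (i + 1) j else 0) - pvG t i j := by
  simp only [contar_vecinos_vivos]
  rw [foldl_guard_add]
  have e1 : ((i : Int) + -1).toNat = i - 1 := by omega
  have e2 : ((i : Int) + 1).toNat = i + 1 := by omega
  have e3 : ((j : Int) + -1).toNat = j - 1 := by omega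
  have e4 : ((j : Int) + 1).toNat = j + 1 := by omega
  simp only [List.map_cons, List.map_nil, List.sum_cons, List.sum_nil, dir_term,
    add_zero, e1, e2, e3, e4, Int.toNat_natCast, pvRow]
  have c1 : (0 ≤ (i:Int) + -1 ∧ (i:Int) + -1 < (t.length:Int) ∧ 0 ≤ (j:Int) + -1 ∧ (j:Int) + -1 < ((t.getD 0 []).length:Int)) ↔ (1 ≤ i ∧ 1 ≤ j) := by omega
  have c2 : (0 ≤ (i:Int) + -1 ∧ (i:Int) + -1 < (t.length:Int) ∧ 0 ≤ (j:Int) ∧ (j:Int) < ((t.getD 0 []).length:Int)) ↔ (1 ≤ i) := by omega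
  have c3 : (0 ≤ (i:Int) + -1 ∧ (i:Int) + -1 < (t.length:Int) ∧ 0 ≤ (j:Int) + 1 ∧ (j:Int) + 1 < ((t.getD 0 []).length:Int)) ↔ (1 ≤ i ∧ j + 1 < (t.getD 0 []).length) := by omega
  have c4 : (0 ≤ (i:Int) ∧ (i:Int) < (t.length:Int) ∧ 0 ≤ (j:Int) + -1 ∧ (j:Int) + -1 < ((t.getD 0 []).length:Int)) ↔ (1 ≤ j) := by omega
  have c5 : (0 ≤ (i:Int) ∧ (i:Int) < (t.length:Int) ∧ 0 ≤ (j:Int) + 1 ∧ (j:Int) + 1 < ((t.getD 0 []).length:Int)) ↔ (j + 1 < (t.getD 0 []).length) := by omega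
  have c6 : (0 ≤ (i:Int) + 1 ∧ (i:Int) + 1 < (t.length:Int) ∧ 0 ≤ (j:Int) + -1 ∧ (j:Int) + -1 < ((t.getD 0 []).length:Int)) ↔ (i + 1 < t.length ∧ 1 ≤ j) := by omega
  have c7 : (0 ≤ (i:Int) + 1 ∧ (i:Int) + 1 < (t.length:Int) ∧ 0 ≤ (j:Int) ∧ (j:Int) < ((t.getD 0 []).length:Int)) ↔ (i + 1 < t.length) := by omega
  have c8 : (0 ≤ (i:Int) + 1 ∧ (i:Int) + 1 < (t.length:Int) ∧ 0 ≤ (j:Int) + 1 ∧ (j:Int) + 1 < ((t.getD 0 []).length:Int)) ↔ (i + 1 < t.length ∧ j + 1 < (t.getD 0 []).length) := by omega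
  simp only [c1, c2, c3, c4, c5, c6, c7, c8]
  by_cases h1 : 1 ≤ i <;> by_cases h2 : i + 1 < t.length <;>
    by_cases h3 : 1 ≤ j <;> by_cases h4 : j + 1 < (t.getD 0 []).length <;>
    simp [h1, h2, h3, h4] <;> ring

lemma innerS (fila previa : List Int) (m : Nat) :
    (PySem.List.pyRange 0 (m : Int) 1).foldl
      (fun (p : List Int × Int) j =>
        (p.1 ++ [PySem.List.pyGetD previa (j + 1) 0 + (p.2 + PySem.List.pyGetD fila j 0)],
         p.2 + PySem.List.pyGetD fila j 0)) ([(0 : Int)], 0)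
    = ((List.range (m + 1)).map (fun b =>
          if b = 0 then 0 else previa.getD b 0 + ((List.range b).map (fun e => fila.getD e 0)).sum),
       ((List.range m).map (fun e => fila.getD e 0)).sum) := by
  induction m with
  | zero => simp [PySem.List.pyRange_one_eq_nil]
  | succ m ih =>
    have hcast : ((m + 1 : Nat) : Int) = (m : Int) + 1 := by push_cast; ring
    rw [hcast, PySem.List.pyRange_one_succ_right (by positivity), List.foldl_append, ih]
    simp only [List.foldl_cons, List.foldl_nil]
    rw [show ((m : Int) + 1) = ((m + 1 : Nat) : Int) from hcast.symm,
      PySem.List.pyGetD_natCast, PySem.List.pyGetD_natCast]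
    simp [List.range_succ]

lemma foldl_invariant {α β : Type} (step : β → α → β) (l : List α) (inv : Nat → β)
    (h : ∀ k, (hk : k < l.length) → step (inv k) l[k] = inv (k + 1)) :
    l.foldl step (inv 0) = inv l.length := by
  suffices key : ∀ n k, k ≤ l.length → l.length - k = n →
      (l.drop k).foldl step (inv k) = inv l.length by
    simpa using key l.length 0 (by omega) (by omega)
  intro n
  induction n with
  | zero =>
    intro k hk h0
    have : k = l.length := by omega
    subst this
    simp
  | succ n ih =>
    intro k hk h0
    have hklt : k < l.length := by omega
    rw [List.drop_eq_getElem_cons hklt, List.foldl_cons, h k hklt]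
    exact ih (k + 1) (by omega) (by omega)

lemma S_spec (t : List (List Int)) :
    t.foldl (fun S fila =>
        let previa := PySem.List.pyGetD S (-1) []
        let r := (PySem.List.pyRange 0 (((PySem.List.pyGetD t 0 []).length : Nat) : Int) 1).foldl
          (fun (p : List Int × Int) j =>
            let acumulado := p.2 + PySem.List.pyGetD fila j 0
            (p.1 ++ [PySem.List.pyGetD previa (j + 1) 0 + acumulado], acumulado)) ([(0 : Int)], 0)
        S ++ [r.1])
      [PySem.List.pyRepeat [(0 : Int)] (((PySem.List.pyGetD t 0 []).length : Nat) + 1)]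
    = (List.range (t.length + 1)).map (fun r =>
        (List.range ((t.getD 0 []).length + 1)).map (fun c => pvP t r c)) := by
  have hinit : [PySem.List.pyRepeat [(0 : Int)] (((PySem.List.pyGetD t 0 []).length : Nat) + 1)]
      = (List.range (0 + 1)).map (fun r => (List.range ((t.getD 0 []).length + 1)).map (fun c => pvP t r c)) := by
    rw [PySem.List.pyRepeat_singleton]
    simp [pvP, List.map_const', PySem.List.pyGetD_zero]
  rw [hinit]
  have := foldl_invariant (l := t)
    (step := fun S fila =>
      let previa := PySem.List.pyGetD S (-1) []
      let r := (PySem.List.pyRange 0 (((PySem.List.pyGetD t 0 []).length : Nat) : Int) 1).foldl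
        (fun (p : List Int × Int) j =>
          let acumulado := p.2 + PySem.List.pyGetD fila j 0
          (p.1 ++ [PySem.List.pyGetD previa (j + 1) 0 + acumulado], acumulado)) ([(0 : Int)], 0)
      S ++ [r.1])
    (inv := fun k => (List.range (k + 1)).map (fun r =>
      (List.range ((t.getD 0 []).length + 1)).map (fun c => pvP t r c)))
    ?_
  · exact this
  intro k hk
  simp only []
  rw [innerS]
  have hlast : PySem.List.pyGetD ((List.range (k + 1)).map (fun r =>
      (List.range ((t.getD 0 []).length + 1)).map (fun c => pvP t r c))) (-1) []
      = (List.range ((t.getD 0 []).length + 1)).map (fun c => pvP t k c) := by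
    rw [PySem.List.pyGetD_neg_one _ _ (by simp)]
    simp [List.getLast_eq_getElem]
  rw [hlast]
  simp only [PySem.List.pyGetD_zero]
  rw [List.range_succ (n := k + 1), List.map_append]
  congr 1
  refine congrArg (fun x => [x]) ?_
  refine List.map_congr_left fun b hb => ?_
  have hb' : b < (t.getD 0 []).length + 1 := by simpa using hb
  have hgk : t.getD k [] = t[k] := List.getD_eq_getElem t [] hk
  by_cases hb0 : b = 0
  · subst hb0; simp [pvP, pvQ]
  · rw [if_neg hb0, PySem.List.getD_map_range _ _ _ _ hb']
    simp [pvP, pvQ, List.range_succ]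
    exact congrArg List.sum (List.map_congr_left fun e _ => by
      simp [pvG, List.getD_eq_getElem?_getD, List.getElem?_eq_getElem hk])

lemma vecB_eq (t : List (List Int)) (i j : Nat) (hi : i < t.length)
    (hj : j < (t.getD 0 []).length) :
    PySem.List.pyGetD
        (PySem.List.pyGetD ((List.range (t.length + 1)).map (fun r =>
          (List.range ((t.getD 0 []).length + 1)).map (fun c => pvP t r c)))
          (min ((i : Int) + 2) (t.length : Int)) [])
        (min ((j : Int) + 2) ((t.getD 0 []).length : Int)) 0
      - PySem.List.pyGetD
          (PySem.List.pyGetD ((List.range (t.length + 1)).map (fun r =>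
            (List.range ((t.getD 0 []).length + 1)).map (fun c => pvP t r c)))
            (min ((i : Int) + 2) (t.length : Int)) [])
          (max ((j : Int) - 1) 0) 0
      - PySem.List.pyGetD
          (PySem.List.pyGetD ((List.range (t.length + 1)).map (fun r =>
            (List.range ((t.getD 0 []).length + 1)).map (fun c => pvP t r c)))
            (max ((i : Int) - 1) 0) [])
          (min ((j : Int) + 2) ((t.getD 0 []).length : Int)) 0
      + PySem.List.pyGetD
          (PySem.List.pyGetD ((List.range (t.length + 1)).map (fun r =>
            (List.range ((t.getD 0 []).length + 1)).map (fun c => pvP t r c)))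
            (max ((i : Int) - 1) 0) [])
          (max ((j : Int) - 1) 0) 0
      - PySem.List.pyGetD (PySem.List.pyGetD t (i : Int) []) (j : Int) 0
    = contar_vecinos_vivos t i j := by
  have er0 : max ((i : Int) - 1) 0 = ((i - 1 : Nat) : Int) := by omega
  have er1 : min ((i : Int) + 2) (t.length : Int) = ((min (i + 2) t.length : Nat) : Int) := by omega
  have ec0 : max ((j : Int) - 1) 0 = ((j - 1 : Nat) : Int) := by omega
  have ec1 : min ((j : Int) + 2) (((t.getD 0 []).length : Nat) : Int)
      = ((min (j + 2) (t.getD 0 []).length : Nat) : Int) := by omega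
  rw [er0, er1, ec0, ec1]
  simp only [PySem.List.pyGetD_natCast]
  rw [PySem.List.getD_map_range _ _ _ _ (by omega), PySem.List.getD_map_range _ _ _ _ (by omega),
    PySem.List.getD_map_range _ _ _ _ (by omega), PySem.List.getD_map_range _ _ _ _ (by omega),
    PySem.List.getD_map_range _ _ _ _ (by omega), PySem.List.getD_map_range _ _ _ _ (by omega)]
  have hg : (t.getD i []).getD j 0 = pvG t i j := rfl
  rw [hg, vec_eq t i j hi hj, blockW t i j hi hj]

lemma foldl_invariant_range {β : Type} (R : Nat) (step : β → Nat → β) (inv : Nat → β)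
    (init : β) (hinit : init = inv 0)
    (hstep : ∀ k, k < R → step (inv k) k = inv (k + 1)) :
    (List.range R).foldl step init = inv R := by
  subst hinit
  have h := foldl_invariant step (List.range R) inv ?_
  · simpa using h
  · intro k hk
    rw [List.getElem_range]
    exact hstep k (by simpa using hk)

lemma set_map_range {α : Type} (n : Nat) (f : Nat → α) (i : Nat) (v : α) (_h : i < n) :
    ((List.range n).map f).set i v = (List.range n).map (fun a => if a = i then v else f a) := by
  apply List.ext_getElem
  · simp
  · intro a h1 h2
    rw [List.getElem_set, List.getElem_map, List.getElem_map]
    rcases eq_or_ne i a with ha | ha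
    · subst ha; simp
    · simp [ha, ha.symm]

lemma rowset (m C : Nat) (f : Nat → Int) (hm : m < C) :
    ((List.range m).map f ++ List.replicate (C - m) (0 : Int)).set m (f m)
      = (List.range (m + 1)).map f ++ List.replicate (C - (m + 1)) 0 := by
  apply List.ext_getElem
  · simp; omega
  · intro a h1 h2
    simp only [List.length_set, List.length_append, List.length_map, List.length_range,
      List.length_replicate] at h1
    rw [List.getElem_set]
    by_cases ha : m = a <;>
      simp [List.getElem_append, ha] <;> split_ifs <;> simp_all <;> omega

lemma rowext (m C : Nat) (f : Nat → Int) (hm : m < C) (hf : f m = 0) :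
    (List.range m).map f ++ List.replicate (C - m) (0 : Int)
      = (List.range (m + 1)).map f ++ List.replicate (C - (m + 1)) 0 := by
  have hrep : List.replicate (C - m) (0 : Int) = 0 :: List.replicate (C - (m + 1)) 0 := by
    have : C - m = (C - (m + 1)) + 1 := by omega
    rw [this, List.replicate_succ]
  rw [hrep, List.range_succ, List.map_append]
  simp [hf]

lemma inner_pair {γ : Type} (C : Nat) (innerstep : (List Int × List γ) → Nat → (List Int × List γ))
    (valf : Nat → Int) (chgf : Nat → Option γ) (cs0 : List γ)
    (h : ∀ xs cs m, m < C → innerstep (xs, cs) m = (xs ++ [valf m], cs ++ (chgf m).toList)) :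
    (List.range C).foldl innerstep ([], cs0)
      = ((List.range C).map valf, cs0 ++ (List.range C).filterMap chgf) := by
  refine foldl_invariant_range C innerstep
    (fun m => ((List.range m).map valf, cs0 ++ (List.range m).filterMap chgf)) _ (by simp) ?_
  intro m hm
  rw [h _ _ m hm]
  cases hc : chgf m <;> simp [List.range_succ, List.filterMap_append, hc]

lemma B_step {γ : Type} (C : Nat) (innerstep : (List Int × List γ) → Nat → (List Int × List γ))
    (valf : Nat → Int) (chgf : Nat → Option γ) (A : List (List Int)) (cs0 : List γ)
    (rhs1 : List (List Int)) (rhs2 : List γ)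
    (h : ∀ xs cs m, m < C → innerstep (xs, cs) m = (xs ++ [valf m], cs ++ (chgf m).toList))
    (h1 : A ++ [(List.range C).map valf] = rhs1)
    (h2 : cs0 ++ (List.range C).filterMap chgf = rhs2) :
    (A ++ [((List.range C).foldl innerstep ([], cs0)).1],
      ((List.range C).foldl innerstep ([], cs0)).2) = (rhs1, rhs2) := by
  rw [inner_pair C innerstep valf chgf cs0 h]
  simp [← h1, ← h2]

theorem B_canon (t : List (List Int)) :
    aplicar_reglas_alt t
      = ((List.range t.length).map (fun i => (List.range ((t.getD 0 []).length)).map (pvVal t i)),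
         (List.range t.length).flatMap (fun i => (List.range ((t.getD 0 []).length)).filterMap (pvChg t i))) := by
  simp only [aplicar_reglas_alt]
  rw [S_spec]
  simp only [PySem.List.pyGetD_zero]
  rw [PySem.List.pyRange_zero_natCast t.length, List.foldl_map]
  refine foldl_invariant_range t.length _ (fun k =>
      ((List.range k).map (fun a => (List.range ((t.getD 0 []).length)).map (pvVal t a)),
       (List.range k).flatMap (fun a => (List.range ((t.getD 0 []).length)).filterMap (pvChg t a))))
      _ (by simp) ?_
  intro k hk
  simp only []
  rw [PySem.List.pyRange_zero_natCast, List.foldl_map]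
  apply B_step ((t.getD 0 []).length) _ (pvVal t k) (pvChg t k)
  · intro xs cs m hm
    simp only []
    rw [vecB_eq t k m hk hm]
    simp only [PySem.List.pyGetD_natCast]
    have hcel : (t.getD k []).getD m 0 = pvG t k m := rfl
    rw [hcel]
    simp only [pvVal, pvChg]
    split_ifs with h1 h2 h3 h4 h5 <;> simp_all <;> omega
  · simp [List.range_succ]
  · simp [List.range_succ]

def pvMat (t : List (List Int)) (k m : Nat) : List (List Int) :=
  (List.range t.length).map (fun a =>
    if a < k then (List.range ((t.getD 0 []).length)).map (pvVal t a)
    else if a = k then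
      (List.range m).map (pvVal t k) ++ List.replicate ((t.getD 0 []).length - m) 0
    else List.replicate ((t.getD 0 []).length) 0)

lemma pvMat_write (t : List (List Int)) (k m : Nat) (hk : k < t.length)
    (hm : m < (t.getD 0 []).length) (v : Int) (hv : v = pvVal t k m) :
    (pvMat t k m).set k (((pvMat t k m).getD k []).set m v) = pvMat t k (m + 1) := by
  subst hv
  have hrow : (pvMat t k m).getD k []
      = (List.range m).map (pvVal t k) ++ List.replicate ((t.getD 0 []).length - m) 0 := by
    rw [pvMat, PySem.List.getD_map_range _ _ _ _ hk]
    simp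
  rw [hrow, rowset m _ (pvVal t k) hm, pvMat, set_map_range _ _ _ _ hk]
  rw [pvMat]
  refine List.map_congr_left fun a _ => ?_
  by_cases ha : a = k
  · subst ha; simp
  · by_cases hl : a < k <;> simp [ha, hl]

lemma pvMat_skip (t : List (List Int)) (k m : Nat) (hk : k < t.length)
    (hm : m < (t.getD 0 []).length) (h0 : pvVal t k m = 0) :
    pvMat t k m = pvMat t k (m + 1) := by
  rw [pvMat, pvMat]
  refine List.map_congr_left fun a _ => ?_
  by_cases ha : a = k
  · subst ha
    simp only [if_neg (lt_irrefl a)]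
    exact rowext m _ (pvVal t a) hm h0
  · by_cases hl : a < k
    · simp only [if_pos hl]
    · simp only [if_neg hl, if_neg ha]

lemma pvMat_roll (t : List (List Int)) (k : Nat) :
    pvMat t k ((t.getD 0 []).length) = pvMat t (k + 1) 0 := by
  rw [pvMat, pvMat]
  refine List.map_congr_left fun a _ => ?_
  by_cases h1 : a < k
  · simp only [if_pos h1, if_pos (show a < k + 1 by omega)]
  · by_cases h2 : a = k
    · subst h2
      simp only [if_neg (lt_irrefl a)]
      simp
    · simp only [if_neg h1, if_neg h2, if_neg (show ¬a < k + 1 by omega)]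
      by_cases h3 : a = k + 1 <;> simp [h3]

lemma A_step {γ : Type} (C : Nat) (innerstep : (List (List Int) × List γ) → Nat → (List (List Int) × List γ))
    (Mat : Nat → List (List Int)) (chgf : Nat → Option γ) (M0 : List (List Int)) (cs0 : List γ)
    (rhs1 : List (List Int)) (rhs2 : List γ)
    (h : ∀ cs m, m < C → innerstep (Mat m, cs) m = (Mat (m + 1), cs ++ (chgf m).toList))
    (hM0 : M0 = Mat 0)
    (h1 : Mat C = rhs1) (h2 : cs0 ++ (List.range C).filterMap chgf = rhs2) :
    (List.range C).foldl innerstep (M0, cs0) = (rhs1, rhs2) := by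
  subst hM0 h1 h2
  refine foldl_invariant_range C innerstep
    (fun m => (Mat m, cs0 ++ (List.range m).filterMap chgf)) _ (by simp) ?_
  intro m hm
  rw [h _ m hm]
  cases hc : chgf m <;> simp [List.range_succ, hc]

theorem A_canon (t : List (List Int)) :
    aplicar_reglas t
      = ((List.range t.length).map (fun i => (List.range ((t.getD 0 []).length)).map (pvVal t i)),
         (List.range t.length).flatMap (fun i => (List.range ((t.getD 0 []).length)).filterMap (pvChg t i))) := by
  simp only [aplicar_reglas]
  simp only [PySem.List.pyGetD_zero]
  rw [PySem.List.pyRange_zero_natCast t.length, PySem.List.pyRange_zero_natCast ((t.getD 0 []).length),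
    List.foldl_map]
  refine Eq.trans (foldl_invariant_range t.length _ (fun k =>
      (pvMat t k 0,
       (List.range k).flatMap (fun a => (List.range ((t.getD 0 []).length)).filterMap (pvChg t a))))
      _ ?_ ?_) ?_
  · -- initial matrix
    refine Prod.ext ?_ (by simp)
    simp only [pvMat, List.map_map]
    refine List.map_congr_left fun a _ => ?_
    simp [Function.comp_def, List.map_const']
  · intro k hk
    simp only []
    rw [List.foldl_map]
    refine A_step ((t.getD 0 []).length) _ (fun m => pvMat t k m) (pvChg t k) _ _ _ _ ?_ rfl ?_ ?_
    · intro cs m hm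
      simp only [pyStore2, PySem.List.pySetD_natCast, PySem.List.pyGetD_natCast]
      have hcel : (t.getD k []).getD m 0 = pvG t k m := rfl
      rw [hcel]
      by_cases h1 : pvG t k m = 1
      · rw [if_pos h1]
        by_cases h2 : contar_vecinos_vivos t k m < 2
        · rw [if_pos h2, pvMat_write t k m hk hm 0 (by simp [pvVal, h1, h2])]
          simp [pvChg, h1, h2]
        · rw [if_neg h2]
          by_cases h3 : 3 < contar_vecinos_vivos t k m
          · rw [if_pos h3, pvMat_write t k m hk hm 0 (by simp [pvVal, h1, h2, h3])]
            simp [pvChg, h1, h2, h3]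
          · rw [if_neg h3, pvMat_write t k m hk hm 1 (by simp [pvVal, h1, h2, h3])]
            simp [pvChg, h1, h2, h3]
      · rw [if_neg h1]
        by_cases h4 : contar_vecinos_vivos t k m = 3
        · rw [if_pos h4, pvMat_write t k m hk hm 1 (by simp [pvVal, h1, h4])]
          simp [pvChg, h1, h4]
        · rw [if_neg h4, ← pvMat_skip t k m hk hm (by simp [pvVal, h1, h4])]
          simp [pvChg, h1, h4]
    · exact pvMat_roll t k
    · simp [List.range_succ]
  · refine Prod.ext ?_ (by simp)
    simp only [pvMat]
    exact List.map_congr_left fun a ha => by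
      simp [List.mem_range.mp ha]

theorem ports_agree (t : List (List Int)) :
    aplicar_reglas t = aplicar_reglas_alt t := by
  rw [A_canon, B_canon]

-- ===== VERDICT (by name: the statement is the Claim_ definition above) =====
theorem aplicar_reglas_spec : Claim_equal_aplicar_reglas := by
  intro tablero _ _
  unfold Spec_aplicar_reglas
  exact ports_agree tablero
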